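-- pv_equiv track=rewrite | github.com/workgroupengineering/Flowery.NET | Utils/count_loc.py | _strip_xml_comments
-- ===== SOURCE A (Python) =====
-- def _strip_xml_comments(text: str) -> str:
--     out: list[str] = []
--     i = 0
--     n = len(text)
--     in_comment = False
--
--     while i < n:
--         if not in_comment and text.startswith("<!--", i):
--             in_comment = True
--             i += 4
--             continue
--
--         if in_comment:
--             if text.startswith("-->", i):
--                 in_comment = False
--                 i += 3
--                 continue
--             # Preserve newlines so line counting stays stable.
--             ch = text[i]
--             if ch == "\n":
--                 out.append("\n")
--             i += 1
--             continue
--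
--         out.append(text[i])
--         i += 1
--
--     return "".join(out)
-- ===== SOURCE B (Python) =====
-- def _strip_xml_comments(text: str) -> str:
--     out: list[str] = []
--     pos = 0
--     while True:
--         start = text.find("<!--", pos)
--         if start == -1:
--             out.append(text[pos:])
--             break
--         out.append(text[pos:start])
--         end = text.find("-->", start + 4)
--         if end == -1:
--             out.append("\n" * text.count("\n", start + 4))
--             break
--         out.append("\n" * text.count("\n", start + 4, end))
--         pos = end + 3
--     return "".join(out)
-- ===== Notes on version B (the rewrite author's own statement) =====
-- stated objective: faster
-- what changed: Replaces the character-at-a-time state machine with a chunk-jumping scan that uses str.find to locate each comment-open marker and its matching close marker and copies whole slices, emitting one newline per newline counted inside a comment body, instead of inspecting every character with an in_comment flag.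
import Mathlib
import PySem

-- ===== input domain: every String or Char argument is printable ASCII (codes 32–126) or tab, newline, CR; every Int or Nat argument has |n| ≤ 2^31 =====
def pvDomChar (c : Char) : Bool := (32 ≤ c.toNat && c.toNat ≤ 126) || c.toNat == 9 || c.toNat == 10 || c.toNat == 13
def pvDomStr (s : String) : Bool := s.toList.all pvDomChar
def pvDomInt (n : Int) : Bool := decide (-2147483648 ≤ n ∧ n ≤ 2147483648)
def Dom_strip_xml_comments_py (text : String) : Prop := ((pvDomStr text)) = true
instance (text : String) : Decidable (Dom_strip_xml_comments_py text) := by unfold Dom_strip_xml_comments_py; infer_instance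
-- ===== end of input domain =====

-- B replaces A's per-character in_comment state machine by a chunk-jumping scan that
-- finds each '<!--' and its matching '-->' and copies whole slices (faster by a constant factor).

-- ===== PORT A =====
-- A's while loop over index i with the in_comment flag, transliterated as structural
-- recursion over the remaining character list; 'out.append' is the reversed accumulator.
def pvGoA (cs : List Char) (inC : Bool) (out : List Char) : List Char :=
  match cs with
  | [] => out.reverse
  | c :: rest =>
    if !inC && ['<', '!', '-', '-'].isPrefixOf (c :: rest) then
      pvGoA ((c :: rest).drop 4) true out
    else if inC then
      if ['-', '-', '>'].isPrefixOf (c :: rest) then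
        pvGoA ((c :: rest).drop 3) false out
      else
        pvGoA rest inC (if c = '\n' then '\n' :: out else out)
    else
      pvGoA rest inC (c :: out)
termination_by cs.length
decreasing_by all_goals simp

def strip_xml_comments_py (text : String) : String :=
  String.ofList (pvGoA text.toList false [])

-- ===== PORT B =====
-- text.find(pat, pos), ported by hand over the character list (exact: first index at
-- which pat occurs as a prefix of the suffix, none = Python's -1).
def pvFindIdx (pat cs : List Char) : Option Nat :=
  if pat.isPrefixOf cs then some 0
  else
    match cs with
    | [] => none
    | _ :: rest => (pvFindIdx pat rest).map (· + 1)

theorem pvFindIdx_le {pat cs : List Char} {i : Nat} (h : pvFindIdx pat cs = some i) :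
    i + pat.length ≤ cs.length := by
  induction cs generalizing i with
  | nil =>
    unfold pvFindIdx at h
    split at h
    · next hp => simp_all [List.isPrefixOf_iff_prefix]
      
    · exact absurd h (by simp)
  | cons c rest ih =>
    unfold pvFindIdx at h
    split at h
    · next hp =>
      cases h
      have := (List.isPrefixOf_iff_prefix.mp hp).length_le
      simpa using this
    · simp only [Option.map_eq_some_iff] at h
      obtain ⟨j, hj, rfl⟩ := h
      have := ih hj
      simp; omega

-- B's loop: find the next '<!--' from pos; if none, copy the tail; else copy the slice
-- before it, find the matching '-->', emit '\n' * count for the comment body, continue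
-- after it ('\n' * k is List.replicate k '\n').
def pvGoB (cs : List Char) : List Char :=
  match hfound : pvFindIdx ['<', '!', '-', '-'] cs with
  | none => cs
  | some s =>
    cs.take s ++
      (match pvFindIdx ['-', '-', '>'] (cs.drop (s + 4)) with
       | none => List.replicate ((cs.drop (s + 4)).count '\n') '\n'
       | some e =>
           List.replicate (((cs.drop (s + 4)).take e).count '\n') '\n' ++
             pvGoB ((cs.drop (s + 4)).drop (e + 3)))
termination_by cs.length
decreasing_by
  have := pvFindIdx_le hfound
  simp at this ⊢; omega

def strip_xml_comments_py_alt (text : String) : String :=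
  String.ofList (pvGoB text.toList)

-- ===== PRECONDITION & SPEC =====
def Spec_strip_xml_comments_py (text : String) (out : String) : Prop := out = strip_xml_comments_py_alt text
instance (text : String) (out : String) : Decidable (Spec_strip_xml_comments_py text out) := by unfold Spec_strip_xml_comments_py; infer_instance

-- ===== CLAIM (what is proved, stated in full; the proofs are below) =====
def Claim_equal_strip_xml_comments_py : Prop := ∀ (text : String), Dom_strip_xml_comments_py text → Spec_strip_xml_comments_py text (strip_xml_comments_py text)

-- ===== LEMMAS AND PROOFS =====

-- What B computes once inside a comment (after a '<!--'): the rest of B's inner match.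
def pvInB (cs : List Char) : List Char :=
  match pvFindIdx ['-', '-', '>'] cs with
  | none => List.replicate (cs.count '\n') '\n'
  | some e => List.replicate ((cs.take e).count '\n') '\n' ++ pvGoB (cs.drop (e + 3))

theorem pvGoB_none {cs : List Char} (h : pvFindIdx ['<', '!', '-', '-'] cs = none) :
    pvGoB cs = cs := by
  unfold pvGoB; split <;> simp_all

theorem pvGoB_some {cs : List Char} {s : Nat}
    (h : pvFindIdx ['<', '!', '-', '-'] cs = some s) :
    pvGoB cs = cs.take s ++ pvInB (cs.drop (s + 4)) := by
  unfold pvGoB pvInB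
  split <;> simp_all [Nat.add_comm, Nat.add_assoc, Nat.add_left_comm]

theorem pvFindIdx_cons_not {pat : List Char} {c : Char} {rest : List Char}
    (h : ¬ pat.isPrefixOf (c :: rest)) :
    pvFindIdx pat (c :: rest) = (pvFindIdx pat rest).map (· + 1) := by
  rw [pvFindIdx.eq_def]; simp [h]

theorem pvFindIdx_prefix {pat cs : List Char} (h : pat.isPrefixOf cs) :
    pvFindIdx pat cs = some 0 := by
  rw [pvFindIdx.eq_def]; simp [h]

-- Peeling one non-comment-opening character off B's scan.
theorem pvGoB_cons {c : Char} {rest : List Char}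
    (h : ¬ ['<', '!', '-', '-'].isPrefixOf (c :: rest)) :
    pvGoB (c :: rest) = c :: pvGoB rest := by
  cases h4 : pvFindIdx ['<', '!', '-', '-'] rest with
  | none =>
    rw [pvGoB_none (by rw [pvFindIdx_cons_not h, h4]; rfl), pvGoB_none h4]
  | some s =>
    rw [pvGoB_some (by rw [pvFindIdx_cons_not h, h4]; rfl), pvGoB_some h4]
    simp [List.take_succ_cons, List.drop_succ_cons]

-- Peeling one in-comment character off B's comment body handling.
theorem pvInB_cons {c : Char} {rest : List Char}
    (h : ¬ ['-', '-', '>'].isPrefixOf (c :: rest)) :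
    pvInB (c :: rest) = (if c = '\n' then ['\n'] else []) ++ pvInB rest := by
  unfold pvInB
  rw [pvFindIdx_cons_not h]
  cases h3 : pvFindIdx ['-', '-', '>'] rest with
  | none =>
    simp [List.count_cons]
    split_ifs with hc <;> simp [List.replicate_succ]
  | some e =>
    simp [List.take_succ_cons, List.drop_succ_cons, List.count_cons]
    split_ifs with hc <;> simp [List.replicate_succ]

theorem pvGoB_nil : pvGoB [] = [] := pvGoB_none (by decide)

theorem pvInB_nil : pvInB [] = [] := by unfold pvInB; decide

theorem pvInB_close {cs : List Char} (h : ['-', '-', '>'].isPrefixOf cs) :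
    pvInB cs = pvGoB (cs.drop 3) := by
  unfold pvInB
  rw [pvFindIdx_prefix h]
  simp

-- The main invariant: A's state machine computes B's result, in both modes.
theorem pvGoA_eq (n : Nat) :
    ∀ cs : List Char, cs.length ≤ n →
      (∀ out, pvGoA cs false out = out.reverse ++ pvGoB cs) ∧
      (∀ out, pvGoA cs true out = out.reverse ++ pvInB cs) := by
  induction n with
  | zero =>
    intro cs hcs
    have : cs = [] := List.eq_nil_of_length_eq_zero (Nat.le_zero.mp hcs)
    subst this
    constructor <;> intro out <;> simp [pvGoA, pvGoB_nil, pvInB_nil]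
  | succ n ih =>
    intro cs hcs
    match cs with
    | [] =>
      constructor <;> intro out <;> simp [pvGoA, pvGoB_nil, pvInB_nil]
    | c :: rest =>
      have hr : rest.length ≤ n := by simpa using hcs
      constructor
      · intro out
        by_cases hp : ['<', '!', '-', '-'].isPrefixOf (c :: rest)
        · -- a comment opens here
          have hlen : ((c :: rest).drop 4).length ≤ n := by simp; omega
          rw [pvGoA]
          simp only [hp, Bool.not_false, Bool.true_and, if_true]
          rw [(ih _ hlen).2 out, pvGoB_some (pvFindIdx_prefix hp)]
          simp
        · rw [pvGoA]
          simp only [hp, Bool.not_false, Bool.true_and, if_false, Bool.false_eq_true]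
          rw [(ih rest hr).1 (c :: out), pvGoB_cons hp]
          simp
      · intro out
        by_cases hp : ['-', '-', '>'].isPrefixOf (c :: rest)
        · -- the comment closes here
          have hlen : ((c :: rest).drop 3).length ≤ n := by simp; omega
          rw [pvGoA]
          simp only [Bool.not_true, Bool.false_and, Bool.false_eq_true, if_false, if_true, hp]
          rw [(ih _ hlen).1 out, pvInB_close hp]
        · rw [pvGoA]
          simp only [Bool.not_true, Bool.false_and, Bool.false_eq_true, if_false, if_true, hp]
          rw [(ih rest hr).2 (if c = '\n' then '\n' :: out else out), pvInB_cons hp]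
          split_ifs with hc <;> simp

-- ===== VERDICT (by name: the statement is the Claim_ definition above) =====
theorem strip_xml_comments_py_spec : Claim_equal_strip_xml_comments_py := by
  intro text _
  unfold Spec_strip_xml_comments_py strip_xml_comments_py strip_xml_comments_py_alt
  rw [(pvGoA_eq text.toList.length text.toList le_rfl).1 []]
  simp
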